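-- pv_equiv track=rewrite | github.com/JaewanHwang/algorithm-study | problems/pro_PCCP 모의고사 1회_1번/solution.py | solution
-- ===== SOURCE A (Python) =====
-- def solution(input_string):
--     alphabets = set(input_string)
--     ans = set()
--     pos = {c: -1 for c in alphabets}
--     for i, c in enumerate(input_string):
--         if pos[c] != -1 and i - pos[c] > 1:
--             ans.add(c)
--         pos[c] = i
--     if not ans:
--         return 'N'
--     return ''.join(sorted(ans))
-- ===== SOURCE B (Python) =====
-- def solution(input_string):
--     out = []
--     for c in sorted(set(input_string)):
--         idxs = [i for i, d in enumerate(input_string) if d == c]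
--         if any(b - a > 1 for a, b in zip(idxs, idxs[1:])):
--             out.append(c)
--     return ''.join(out) if out else 'N'
-- ===== Notes on version B (the rewrite author's own statement) =====
-- stated objective: alternative
-- what changed: A does one pass over the string maintaining a last-position dict and an answer set; B instead iterates over the sorted distinct characters, extracts each character's occurrence-index list and tests it for an adjacent gap > 1, appending qualifying characters in order.
import Mathlib
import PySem

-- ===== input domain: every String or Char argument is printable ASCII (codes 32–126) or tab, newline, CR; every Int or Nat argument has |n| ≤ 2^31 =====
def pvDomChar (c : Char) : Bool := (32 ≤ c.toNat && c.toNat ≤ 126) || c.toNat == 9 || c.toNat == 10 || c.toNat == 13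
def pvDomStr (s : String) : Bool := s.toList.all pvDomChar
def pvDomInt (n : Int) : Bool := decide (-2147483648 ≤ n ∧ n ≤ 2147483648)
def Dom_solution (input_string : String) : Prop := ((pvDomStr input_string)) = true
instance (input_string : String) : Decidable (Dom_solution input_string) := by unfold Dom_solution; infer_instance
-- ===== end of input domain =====

-- B replaces A's single pass with mutable last-position/answer state by a per-character
-- grouped pass: sorted distinct characters, each checked for a gap in its own index list
-- (objective: alternative decomposition, same asymptotic cost up to the alphabet factor).

-- ===== PORT A =====
-- pos[c] is ported as getD with default -1: the key is always present (pos is keyed by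
-- every character of the string), so this is exact.
def solution (input_string : String) : String :=
  let s := input_string.toList
  let alphabets : PySem.Set Char := PySem.Set.ofList s
  let pos0 : PySem.Dict Char Int :=
    alphabets.foldl (fun d c => d.insert c (-1)) PySem.Dict.empty
  let st := (PySem.List.enumerate s).foldl
    (fun (st : PySem.Set Char × PySem.Dict Char Int) ic =>
      let p := st.2.getD ic.2 (-1)
      let ans := if p ≠ -1 ∧ ic.1 - p > 1 then PySem.Set.add st.1 ic.2 else st.1
      (ans, st.2.insert ic.2 ic.1))
    (PySem.Set.empty, pos0)
  if st.1 = [] then "N" else String.mk (PySem.List.sorted st.1 (fun c => c) false)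

-- ===== PORT B =====
-- any(b - a > 1 for a, b in zip(idxs, idxs[1:]))
def hasGapZip (idxs : List Int) : Bool :=
  (idxs.zip idxs.tail).any (fun ab => decide (ab.2 - ab.1 > 1))

def solution_alt (input_string : String) : String :=
  let s := input_string.toList
  let out := (PySem.List.sorted (PySem.Set.ofList s) (fun c => c) false).foldl
    (fun out c =>
      let idxs := (PySem.List.enumerate s).filterMap
        (fun id => if id.2 = c then some id.1 else none)
      if hasGapZip idxs then out ++ [c] else out) []
  if out ≠ [] then String.mk out else "N"

-- ===== PRECONDITION & SPEC =====
def Spec_solution (input_string : String) (out : String) : Prop := out = solution_alt input_string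
instance (input_string : String) (out : String) : Decidable (Spec_solution input_string out) := by unfold Spec_solution; infer_instance

-- ===== CLAIM (what is proved, stated in full; the proofs are below) =====
def Claim_equal_solution : Prop := ∀ (input_string : String), Dom_solution input_string → Spec_solution input_string (solution input_string)

-- ===== LEMMAS AND PROOFS =====

/-- Occurrence indices of `c` in a character list, offset by `k`. -/
def occFrom (k : Int) : List Char → Char → List Int
  | [], _ => []
  | d :: t, c => if d = c then k :: occFrom (k + 1) t c else occFrom (k + 1) t c

/-- Recursive form of "some adjacent pair differs by more than 1". -/
def hasGapR : List Int → Bool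
  | a :: b :: t => decide (b - a > 1) || hasGapR (b :: t)
  | _ => false

theorem hasGapZip_eq_hasGapR (l : List Int) : hasGapZip l = hasGapR l := by
  induction l with
  | nil => rfl
  | cons a t ih =>
    cases t with
    | nil => rfl
    | cons b u =>
      simp [hasGapZip, hasGapR] at ih ⊢
      rw [← ih]

theorem occFrom_append (k : Int) (p : List Char) (d c : Char) :
    occFrom k (p ++ [d]) c
      = occFrom k p c ++ (if d = c then [k + p.length] else []) := by
  induction p generalizing k with
  | nil => simp [occFrom]
  | cons e t ih =>
    simp only [List.cons_append, occFrom]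
    rw [ih]
    split_ifs <;> simp <;> ring_nf
  
theorem occFrom_not_mem (k : Int) (p : List Char) (c : Char) (h : c ∉ p) :
    occFrom k p c = [] := by
  induction p generalizing k with
  | nil => rfl
  | cons e t ih =>
    simp at h
    simp [occFrom, Ne.symm h.1, ih _ h.2]

theorem occFrom_ge (k : Int) (p : List Char) (c : Char) :
    ∀ x ∈ occFrom k p c, k ≤ x := by
  induction p generalizing k with
  | nil => simp [occFrom]
  | cons e t ih =>
    intro x hx
    simp only [occFrom] at hx
    split_ifs at hx with hd
    · rcases List.mem_cons.mp hx with h | h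
      · omega
      · have := ih (k + 1) x h; omega
    · have := ih (k + 1) x hx; omega

theorem hasGapR_append (l : List Int) (i : Int) :
    hasGapR (l ++ [i])
      = (hasGapR l || match l.getLast? with
          | some a => decide (i - a > 1)
          | none => false) := by
  induction l with
  | nil => rfl
  | cons a t ih =>
    cases t with
    | nil => simp [hasGapR]
    | cons b u =>
      simp only [List.cons_append, hasGapR] at ih ⊢
      rw [ih]
      simp [List.getLast?]
      cases hasGapR (b :: u) <;> simp

/-- getLast?.getD (-1), the value A keeps in `pos`. -/
def lastO (l : List Int) : Int := (l.getLast?).getD (-1)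

def LoopInv (p : List Char) (ans : PySem.Set Char) (pos : PySem.Dict Char Int) : Prop :=
  (∀ c, pos.getD c (-1) = lastO (occFrom 0 p c)) ∧
  (∀ c, c ∈ ans ↔ hasGapR (occFrom 0 p c) = true) ∧
  ans.Nodup

theorem loop_inv (rest : List Char) :
    ∀ (p : List Char) (ans : PySem.Set Char) (pos : PySem.Dict Char Int),
    LoopInv p ans pos →
    LoopInv (p ++ rest)
      (((PySem.List.enumerate rest (p.length : Int)).foldl
        (fun (st : PySem.Set Char × PySem.Dict Char Int) ic =>
          let q := st.2.getD ic.2 (-1)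
          let ans := if q ≠ -1 ∧ ic.1 - q > 1 then PySem.Set.add st.1 ic.2 else st.1
          (ans, st.2.insert ic.2 ic.1)) (ans, pos)).1)
      (((PySem.List.enumerate rest (p.length : Int)).foldl
        (fun (st : PySem.Set Char × PySem.Dict Char Int) ic =>
          let q := st.2.getD ic.2 (-1)
          let ans := if q ≠ -1 ∧ ic.1 - q > 1 then PySem.Set.add st.1 ic.2 else st.1
          (ans, st.2.insert ic.2 ic.1)) (ans, pos)).2) := by
  induction rest with
  | nil => intro p ans pos h; simpa using h
  | cons d t ih =>
    intro p ans pos h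
    obtain ⟨hpos, hans, hnd⟩ := h
    rw [PySem.List.enumerate_cons, List.foldl_cons]
    have hlen : ((p ++ [d]).length : Int) = (p.length : Int) + 1 := by
      simp
    have hstep : LoopInv (p ++ [d])
        (if pos.getD d (-1) ≠ -1 ∧ (p.length : Int) - pos.getD d (-1) > 1
          then PySem.Set.add ans d else ans)
        (pos.insert d (p.length : Int)) := by
      refine ⟨?_, ?_, ?_⟩
      · intro c
        rw [PySem.Dict.getD_insert]
        rw [occFrom_append]
        by_cases hcd : c = d
        · subst hcd
          simp [lastO]
        · simp [hcd, Ne.symm hcd]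
          exact hpos c
      · intro c
        rw [occFrom_append]
        by_cases hcd : c = d
        · subst hcd
          simp only [if_pos rfl, eq_self_iff_true, if_true, zero_add]
          rw [hasGapR_append]
          have hp := hpos c
          constructor
          · intro hmem
            split_ifs at hmem with hcond
            · rw [PySem.Set.mem_add] at hmem
              rcases hmem with hm | hm
              · rw [(hans c).mp hm]; simp
              · obtain ⟨h1, h2⟩ := hcond
                rw [hp] at h1 h2
                unfold lastO at h1 h2
                cases hl : (occFrom 0 p c).getLast? with
                | none => simp [hl] at h1
                | some a =>
                  simp [hl] at h2
                  simp [hl]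
                  omega
            · rw [(hans c).mp hmem]; simp
          · intro hg
            simp only [Bool.or_eq_true] at hg
            rcases hg with hg | hg
            · have := (hans c).mpr hg
              split_ifs
              · rw [PySem.Set.mem_add]; left; exact this
              · exact this
            · -- the new pair fires: condition must hold
              cases hl : (occFrom 0 p c).getLast? with
              | none => simp [hl] at hg
              | some a =>
                simp [hl] at hg
                have ha : 0 ≤ a := by
                  have := occFrom_ge 0 p c a (List.mem_of_getLast? hl)
                  omega
                have hcond : pos.getD c (-1) ≠ -1 ∧ (p.length : Int) - pos.getD c (-1) > 1 := by
                  rw [hp]; unfold lastO; rw [hl]; simp; omega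
                rw [if_pos hcond, PySem.Set.mem_add]
                right; rfl
        · have hdc : ¬ d = c := fun h => hcd h.symm
          simp only [if_neg hdc, List.append_nil]
          split_ifs with hcond
          · rw [PySem.Set.mem_add]
            constructor
            · rintro (hm | hm)
              · exact (hans c).mp hm
              · exact absurd hm hcd
            · intro hg; left; exact (hans c).mpr hg
          · exact hans c
      · split_ifs
        · exact PySem.Set.nodup_add _ _ hnd
        · exact hnd
    have := ih (p ++ [d]) _ _ hstep
    rw [hlen] at this
    simpa [List.append_assoc] using this

theorem pos0_getD (l : List Char) (d : PySem.Dict Char Int)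
    (h : ∀ c, d.getD c (-1) = -1) :
    ∀ c, (l.foldl (fun d c => d.insert c (-1)) d).getD c (-1) = -1 := by
  induction l generalizing d with
  | nil => exact h
  | cons e t ih =>
    intro c
    refine ih _ (fun c => ?_) c
    rw [PySem.Dict.getD_insert]
    split_ifs with hc
    · rfl
    · exact h c

/-- What A's loop computes: membership in the final answer set. -/
theorem solutionA_chars (s : List Char) :
    let ansF := ((PySem.List.enumerate s).foldl
        (fun (st : PySem.Set Char × PySem.Dict Char Int) ic =>
          let q := st.2.getD ic.2 (-1)
          let ans := if q ≠ -1 ∧ ic.1 - q > 1 then PySem.Set.add st.1 ic.2 else st.1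
          (ans, st.2.insert ic.2 ic.1))
        (PySem.Set.empty, (PySem.Set.ofList s).foldl (fun d c => d.insert c (-1)) PySem.Dict.empty)).1
    (∀ c, c ∈ ansF ↔ hasGapR (occFrom 0 s c) = true) ∧ ansF.Nodup := by
  have hbase : LoopInv [] PySem.Set.empty
      ((PySem.Set.ofList s).foldl (fun d c => d.insert c (-1)) PySem.Dict.empty) := by
    refine ⟨?_, ?_, ?_⟩
    · exact pos0_getD _ _ (fun c => by simp [PySem.Dict.getD_empty])
    · intro c; simp [occFrom, hasGapR, PySem.Set.empty]
    · simp [PySem.Set.empty]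
  have := loop_inv s [] PySem.Set.empty _ hbase
  simp only [List.nil_append, List.length_nil, Nat.cast_zero] at this
  exact ⟨this.2.1, this.2.2⟩

/-- B's filterMap over enumerate is `occFrom`. -/
theorem filterMap_enumerate_eq_occFrom (s : List Char) (c : Char) (k : Int) :
    (PySem.List.enumerate s k).filterMap
      (fun id => if id.2 = c then some id.1 else none) = occFrom k s c := by
  induction s generalizing k with
  | nil => rfl
  | cons d t ih =>
    rw [PySem.List.enumerate_cons, List.filterMap_cons]
    by_cases h : d = c
    · simp [occFrom, h, ih]
    · simp [occFrom, h, ih]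

theorem mem_of_hasGap_occFrom (s : List Char) (c : Char)
    (h : hasGapR (occFrom 0 s c) = true) : c ∈ s := by
  by_contra hns
  rw [occFrom_not_mem _ _ _ hns] at h
  simp [hasGapR] at h

def ansA (s : List Char) : PySem.Set Char :=
  ((PySem.List.enumerate s).foldl
      (fun (st : PySem.Set Char × PySem.Dict Char Int) ic =>
        let q := st.2.getD ic.2 (-1)
        let ans := if q ≠ -1 ∧ ic.1 - q > 1 then PySem.Set.add st.1 ic.2 else st.1
        (ans, st.2.insert ic.2 ic.1))
      (PySem.Set.empty, (PySem.Set.ofList s).foldl (fun d c => d.insert c (-1)) PySem.Dict.empty)).1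

theorem solution_eq (input_string : String) :
    solution input_string =
      if ansA input_string.toList = [] then "N"
      else String.mk (PySem.List.sorted (ansA input_string.toList) (fun c => c) false) := rfl

theorem alt_eq (input_string : String) :
    solution_alt input_string =
      (let s := input_string.toList
       let out := (PySem.List.sorted (PySem.Set.ofList s) (fun c => c) false).filter
         (fun c => hasGapR (occFrom 0 s c))
       if out ≠ [] then String.mk out else "N") := by
  unfold solution_alt
  simp only []
  rw [PySem.List.foldl_append_if_eq_filter]
  have hpred : (fun c => hasGapZip ((PySem.List.enumerate input_string.toList).filterMap
        (fun id => if id.2 = c then some id.1 else none)))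
      = (fun c : Char => hasGapR (occFrom 0 input_string.toList c)) := by
    funext c
    rw [filterMap_enumerate_eq_occFrom, hasGapZip_eq_hasGapR]
  rw [List.nil_append, hpred]

theorem main_eq (input_string : String) :
    solution input_string = solution_alt input_string := by
  rw [solution_eq, alt_eq]
  simp only []
  set s := input_string.toList with hs
  have hmem : ∀ c, c ∈ ansA s ↔ hasGapR (occFrom 0 s c) = true := (solutionA_chars s).1
  have hnd : (ansA s).Nodup := (solutionA_chars s).2
  set L := PySem.List.sorted (PySem.Set.ofList s) (fun c => c) false with hL
  set P : Char → Bool := fun c => hasGapR (occFrom 0 s c) with hP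
  have hLlt : L.Pairwise (· < ·) := PySem.List.sorted_ofList_pairwise_lt s
  have hFlt : (L.filter P).Pairwise (· < ·) := List.Pairwise.filter _ hLlt
  have hFnd : (L.filter P).Nodup := hFlt.imp (fun h => ne_of_lt h)
  have hperm : (L.filter P).Perm (ansA s) := by
    rw [List.perm_ext_iff_of_nodup hFnd hnd]
    intro c
    rw [List.mem_filter, hL, PySem.List.mem_sorted, PySem.Set.mem_ofList, hmem c]
    constructor
    · exact fun h => h.2
    · exact fun h => ⟨mem_of_hasGap_occFrom s c h, h⟩
  have hsorted : PySem.List.sorted (ansA s) (fun c => c) false = L.filter P :=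
    PySem.List.sorted_eq_of_perm_of_pairwise_lt _ _ _ hperm hFlt
  by_cases hnil : ansA s = []
  · have hf : L.filter P = [] := by
      rw [hnil] at hperm
      exact List.Perm.eq_nil hperm
    simp only [hnil, hf, ne_eq, not_true_eq_false, if_false, if_true]
  · have hf : L.filter P ≠ [] := by
      intro h
      rw [h] at hperm
      exact hnil (List.Perm.eq_nil hperm.symm)
    simp only [if_neg hnil, if_neg (fun h => hf (by simpa using h))]
    rw [hsorted, if_pos hf]

-- ===== VERDICT (by name: the statement is the Claim_ definition above) =====
theorem solution_spec : Claim_equal_solution := by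
  intro input_string _
  unfold Spec_solution
  exact main_eq input_string
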